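-- pv_equiv track=rewrite | github.com/Mmark94/SCRaMbLE-SIM | SCRaMbLE_simulation_3.py | deletion_essential
-- ===== SOURCE A (Python) =====
-- def deletion_essential(pos1, pos2, syn_chr, essential=[]):
--     if pos1 > pos2:
--         temp=pos1
--         pos1=pos2
--         pos2=temp
--     # It create the new chromosome with the deletion
--     new_chr = syn_chr[:pos1] + syn_chr[pos2:]
--     if essential==[]:
--         return new_chr
--     # It check if all the essential fragments are in the synthetic chromosome before the deletion happen. If there are not, it simply continue with the deletion.
--     new_essential = []
--     syn_chr_abs = [abs(ele) for ele in syn_chr]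
--     for esse in essential:
--         if esse in syn_chr_abs:
--             new_essential.append(esse)
--     # It check if all the essential fragments are in the synthetic chromosome after the deletion happened. If there are not, it will output the original chr.
--     new_chr_abs = [abs(ele) for ele in new_chr]
--     T = all(elem in new_chr_abs for elem in new_essential)
--     if T is False:
--         return syn_chr
--     else:
--         return new_chr
-- ===== SOURCE B (Python) =====
-- def deletion_essential(pos1, pos2, syn_chr, essential=[]):
--     lo, hi = (pos2, pos1) if pos1 > pos2 else (pos1, pos2)
--     n = len(syn_chr)
--     a = max(0, n + lo) if lo < 0 else min(n, lo)
--     b = max(0, n + hi) if hi < 0 else min(n, hi)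
--     # index every absolute fragment value by the positions where it occurs
--     positions = {}
--     for i, x in enumerate(syn_chr):
--         positions.setdefault(abs(x), []).append(i)
--     # an essential fragment is lost iff it occurs and every occurrence lies in [a, b)
--     for e in essential:
--         idxs = positions.get(e)
--         if idxs is not None and all(a <= i < b for i in idxs):
--             return syn_chr
--     return syn_chr[:lo] + syn_chr[hi:]
-- ===== Notes on version B (the rewrite author's own statement) =====
-- stated objective: faster
-- what changed: B builds a positions index (abs value -> list of occurrence indices) in one pass and decides 'essential lost' by comparing each essential's occurrence indices with the clamped deletion index range, instead of A's filtered new_essential list plus whole-chromosome membership scans per essential element.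
import Mathlib
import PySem

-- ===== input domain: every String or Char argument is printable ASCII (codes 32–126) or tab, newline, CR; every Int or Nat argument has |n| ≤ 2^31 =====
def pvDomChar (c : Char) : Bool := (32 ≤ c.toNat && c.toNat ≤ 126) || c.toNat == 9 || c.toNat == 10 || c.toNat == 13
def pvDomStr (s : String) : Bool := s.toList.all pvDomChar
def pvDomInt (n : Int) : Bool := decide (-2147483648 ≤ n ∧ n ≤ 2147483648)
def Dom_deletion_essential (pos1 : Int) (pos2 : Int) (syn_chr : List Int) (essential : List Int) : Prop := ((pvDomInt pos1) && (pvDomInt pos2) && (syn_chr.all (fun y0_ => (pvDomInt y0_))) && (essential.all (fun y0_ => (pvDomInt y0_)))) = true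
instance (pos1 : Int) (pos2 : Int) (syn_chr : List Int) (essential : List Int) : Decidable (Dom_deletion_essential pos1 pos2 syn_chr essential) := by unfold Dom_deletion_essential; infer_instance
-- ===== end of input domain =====

-- B indexes every absolute fragment value by its occurrence positions (one dict pass) and decides
-- "essential lost" by comparing those positions with the clamped deletion index range, instead of
-- A's filtered new_essential list plus whole-chromosome membership scans per essential element.

-- ===== PORT A =====
def deletion_essential (pos1 : Int) (pos2 : Int) (syn_chr : List Int) (essential : List Int) : List Int :=
  let p := if pos1 > pos2 then (pos2, pos1) else (pos1, pos2)
  let new_chr := PySem.List.slice syn_chr none (some p.1) ++ PySem.List.slice syn_chr (some p.2) none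
  if essential = [] then new_chr
  else
    let syn_chr_abs := syn_chr.map (fun ele => |ele|)
    let new_essential := essential.filter (fun esse => decide (esse ∈ syn_chr_abs))
    let new_chr_abs := new_chr.map (fun ele => |ele|)
    let T := new_essential.all (fun elem => decide (elem ∈ new_chr_abs))
    if T = false then syn_chr else new_chr

-- ===== PORT B =====
def deletion_essential_alt (pos1 : Int) (pos2 : Int) (syn_chr : List Int) (essential : List Int) : List Int :=
  let p := if pos1 > pos2 then (pos2, pos1) else (pos1, pos2)
  let lo := p.1
  let hi := p.2
  let n : Int := (syn_chr.length : Int)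
  let a : Int := if lo < 0 then max 0 (n + lo) else min n lo
  let b : Int := if hi < 0 then max 0 (n + hi) else min n hi
  -- positions.setdefault(abs(x), []).append(i)  ==  modify |x| [] (· ++ [i])
  let positions : PySem.Dict Int (List Int) :=
    (PySem.List.enumerate syn_chr).foldl
      (fun d q => d.modify |q.2| [] (fun l => l ++ [q.1])) PySem.Dict.empty
  if essential.any (fun e =>
      match positions.get? e with
      | none => false
      | some idxs => idxs.all (fun i => decide (a ≤ i) && decide (i < b)))
  then syn_chr
  else PySem.List.slice syn_chr none (some lo) ++ PySem.List.slice syn_chr (some hi) none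

-- ===== PRECONDITION & SPEC =====
def Spec_deletion_essential (pos1 : Int) (pos2 : Int) (syn_chr : List Int) (essential : List Int) (out : List Int) : Prop := out = deletion_essential_alt pos1 pos2 syn_chr essential
instance (pos1 : Int) (pos2 : Int) (syn_chr : List Int) (essential : List Int) (out : List Int) : Decidable (Spec_deletion_essential pos1 pos2 syn_chr essential out) := by unfold Spec_deletion_essential; infer_instance

-- ===== CLAIM (what is proved, stated in full; the proofs are below) =====
def Claim_equal_deletion_essential : Prop := ∀ (pos1 : Int) (pos2 : Int) (syn_chr : List Int) (essential : List Int), Dom_deletion_essential pos1 pos2 syn_chr essential → Spec_deletion_essential pos1 pos2 syn_chr essential (deletion_essential pos1 pos2 syn_chr essential)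

-- ===== LEMMAS AND PROOFS =====

-- clampIdx written as B's max/min formula
theorem pv_clampIdx_eq (n : Nat) (x : Int) :
    ((PySem.List.clampIdx n x : Nat) : Int) = if x < 0 then max 0 ((n : Int) + x) else min (n : Int) x := by
  simp [PySem.List.clampIdx]; split_ifs <;> omega

-- the positions dict of B: value at key e
theorem pv_getD (syn : List Int) (e : Int) :
    ((PySem.List.enumerate syn).foldl
        (fun d q => d.modify |q.2| [] (fun l => l ++ [q.1])) PySem.Dict.empty).getD e []
      = ((PySem.List.enumerate syn).filter (fun q => |q.2| == e)).map (fun q => q.1) := by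
  have h := PySem.Dict.getD_foldl_modify_append
      ((PySem.List.enumerate syn).map (fun q => (|q.2|, q.1))) PySem.Dict.empty e
  rw [List.foldl_map] at h
  simpa [List.filter_map, List.map_map, Function.comp_def] using h

-- the positions dict of B: key membership
theorem pv_contains (syn : List Int) (e : Int) :
    ((PySem.List.enumerate syn).foldl
        (fun d q => d.modify |q.2| [] (fun l => l ++ [q.1])) PySem.Dict.empty).contains e = true
      ↔ ∃ q ∈ PySem.List.enumerate syn, |q.2| = e := by
  rw [PySem.Dict.contains_iff_mem_keys,
     PySem.Dict.keys_foldl_modify_key (PySem.List.enumerate syn) (fun q => |q.2|) []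
       (fun _ q => (fun l => l ++ [q.1])) PySem.Dict.empty]
  rw [show (PySem.Dict.empty : PySem.Dict Int (List Int)).keys = [] from rfl]
  simp [PySem.Set.mem_update, eq_comm]

-- occurrence characterisation of the positions-dict value
theorem pv_mem_getD (syn : List Int) (e i : Int) :
    (i ∈ ((PySem.List.enumerate syn).filter (fun q => |q.2| == e)).map (fun q => q.1))
      ↔ ∃ (k : Nat) (h : k < syn.length), |syn[k]| = e ∧ i = (k : Int) := by
  simp only [List.mem_map, List.mem_filter, PySem.List.mem_enumerate_iff]
  constructor
  · rintro ⟨q, ⟨⟨k, hk, rfl⟩, habs⟩, rfl⟩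
    exact ⟨k, hk, by simpa using habs, by simp⟩
  · rintro ⟨k, hk, habs, rfl⟩
    exact ⟨((k : Int), syn[k]), ⟨⟨k, hk, by simp⟩, by simpa using habs⟩, rfl⟩

-- occurrence characterisation of abs-membership in the chromosome
theorem pv_mem_abs (syn : List Int) (e : Int) :
    e ∈ syn.map (fun x => |x|) ↔ ∃ (k : Nat) (h : k < syn.length), |syn[k]| = e := by
  constructor
  · intro h
    rcases List.mem_map.mp h with ⟨x, hx, rfl⟩
    rcases List.mem_iff_getElem.mp hx with ⟨k, hk, rfl⟩
    exact ⟨k, hk, rfl⟩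
  · rintro ⟨k, hk, h⟩
    exact List.mem_map.mpr ⟨syn[k], List.mem_iff_getElem.mpr ⟨k, hk, rfl⟩, h⟩

-- membership in the post-deletion chromosome, by occurrence index
theorem pv_mem_new (syn : List Int) (u v e : Int) :
    e ∈ (PySem.List.slice syn none (some u) ++ PySem.List.slice syn (some v) none).map (fun x => |x|)
      ↔ ∃ (k : Nat) (h : k < syn.length), |syn[k]| = e ∧
          (k < PySem.List.clampIdx syn.length u ∨ PySem.List.clampIdx syn.length v ≤ k) := by
  have h1 : PySem.List.slice syn none (some u) = syn.take (PySem.List.clampIdx syn.length u) := by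
    simp [PySem.List.slice]
  have h2 : PySem.List.slice syn (some v) none = syn.drop (PySem.List.clampIdx syn.length v) :=
    PySem.List.slice_some_none syn v
  rw [h1, h2, List.map_append]
  set A := PySem.List.clampIdx syn.length u with hA
  set B := PySem.List.clampIdx syn.length v with hB
  constructor
  · intro h
    rcases List.mem_append.mp h with h | h
    · rcases List.mem_map.mp h with ⟨x, hx, rfl⟩
      rcases List.mem_take_iff_getElem.mp hx with ⟨k, hk, rfl⟩
      exact ⟨k, by omega, rfl, Or.inl (by omega)⟩
    · rcases List.mem_map.mp h with ⟨x, hx, rfl⟩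
      rcases List.mem_iff_getElem.mp hx with ⟨j, hj, rfl⟩
      rw [List.length_drop] at hj
      rw [List.getElem_drop]
      exact ⟨B + j, by omega, rfl, Or.inr (by omega)⟩
  · rintro ⟨k, hk, habs, hcase | hcase⟩
    · exact List.mem_append.mpr (Or.inl (List.mem_map.mpr
        ⟨syn[k], List.mem_take_iff_getElem.mpr ⟨k, by omega, rfl⟩, habs⟩))
    · refine List.mem_append.mpr (Or.inr (List.mem_map.mpr ⟨syn[k], ?_, habs⟩))
      have h1' : k - B < (syn.drop B).length := by simp [List.length_drop]; omega
      have h2' : (syn.drop B)[k - B] = syn[k] := by rw [List.getElem_drop]; congr 1; omega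
      rw [← h2']
      exact List.getElem_mem h1'

-- the match against the dict lookup, as contains && all
theorem pv_match_eq (d : PySem.Dict Int (List Int)) (P : List Int → Bool) (e : Int) :
    (match d.get? e with
      | none => false
      | some idxs => P idxs) = (d.contains e && P (d.getD e [])) := by
  rw [PySem.Dict.contains_eq_isSome_get?, PySem.Dict.getD_eq_get?_getD]
  cases h : d.get? e <;> simp

-- B's per-essential test is exactly A's "present before, absent after" condition
theorem pv_cond (syn : List Int) (u v e : Int) :
    ((match ((PySem.List.enumerate syn).foldl
          (fun d q => d.modify |q.2| [] (fun l => l ++ [q.1])) PySem.Dict.empty).get? e with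
        | none => false
        | some idxs => idxs.all (fun i =>
            decide ((if u < 0 then max 0 ((syn.length : Int) + u) else min (syn.length : Int) u) ≤ i) &&
            decide (i < (if v < 0 then max 0 ((syn.length : Int) + v) else min (syn.length : Int) v)))) = true)
      ↔ (e ∈ syn.map (fun x => |x|) ∧
          e ∉ (PySem.List.slice syn none (some u) ++ PySem.List.slice syn (some v) none).map (fun x => |x|)) := by
  rw [pv_match_eq, Bool.and_eq_true, List.all_eq_true, pv_getD]
  constructor
  · rintro ⟨hc, hall⟩
    have hmem : e ∈ syn.map (fun x => |x|) := by
      rcases (pv_contains syn e).mp hc with ⟨q, hq, habs⟩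
      rcases (PySem.List.mem_enumerate_iff syn 0 q).mp hq with ⟨k, hk, rfl⟩
      exact (pv_mem_abs syn e).mpr ⟨k, hk, by simpa using habs⟩
    refine ⟨hmem, fun hnew => ?_⟩
    rcases (pv_mem_new syn u v e).mp hnew with ⟨k, hk, habs, hout⟩
    have hin : (k : Int) ∈ ((PySem.List.enumerate syn).filter (fun q => |q.2| == e)).map (fun q => q.1) :=
      (pv_mem_getD syn e (k : Int)).mpr ⟨k, hk, habs, rfl⟩
    have h2 := hall _ hin
    rw [Bool.and_eq_true, decide_eq_true_eq, decide_eq_true_eq,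
      ← pv_clampIdx_eq syn.length u, ← pv_clampIdx_eq syn.length v] at h2
    omega
  · rintro ⟨hmem, hnew⟩
    rcases (pv_mem_abs syn e).mp hmem with ⟨k0, hk0, habs0⟩
    refine ⟨(pv_contains syn e).mpr ⟨((k0 : Int), syn[k0]),
        (PySem.List.mem_enumerate_iff syn 0 _).mpr ⟨k0, hk0, by simp⟩, habs0⟩, fun i hi => ?_⟩
    rcases (pv_mem_getD syn e i).mp hi with ⟨k, hk, habs, rfl⟩
    have hor : ¬ (k < PySem.List.clampIdx syn.length u ∨ PySem.List.clampIdx syn.length v ≤ k) :=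
      fun hc => hnew ((pv_mem_new syn u v e).mpr ⟨k, hk, habs, hc⟩)
    rw [Bool.and_eq_true, decide_eq_true_eq, decide_eq_true_eq,
      ← pv_clampIdx_eq syn.length u, ← pv_clampIdx_eq syn.length v]
    exact ⟨by omega, by omega⟩

-- the two bodies agree once the bound swap has been resolved to (u, v)
theorem pv_main (u v : Int) (syn ess : List Int) (x y : List Int)
    (hA : x =
      (if ess = [] then PySem.List.slice syn none (some u) ++ PySem.List.slice syn (some v) none
       else
        if ((ess.filter (fun esse => decide (esse ∈ syn.map (fun ele => |ele|)))).all
              (fun elem => decide (elem ∈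
                (PySem.List.slice syn none (some u) ++ PySem.List.slice syn (some v) none).map (fun ele => |ele|)))) = false
        then syn
        else PySem.List.slice syn none (some u) ++ PySem.List.slice syn (some v) none))
    (hB : y =
      (if ess.any (fun e =>
          match ((PySem.List.enumerate syn).foldl
              (fun d q => d.modify |q.2| [] (fun l => l ++ [q.1])) PySem.Dict.empty).get? e with
          | none => false
          | some idxs => idxs.all (fun i =>
              decide ((if u < 0 then max 0 ((syn.length : Int) + u) else min (syn.length : Int) u) ≤ i) &&
              decide (i < (if v < 0 then max 0 ((syn.length : Int) + v) else min (syn.length : Int) v))))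
        then syn
        else PySem.List.slice syn none (some u) ++ PySem.List.slice syn (some v) none)) :
    x = y := by
  rw [hA, hB]
  by_cases hex : ∃ e ∈ ess, e ∈ syn.map (fun x => |x|) ∧
      e ∉ (PySem.List.slice syn none (some u) ++ PySem.List.slice syn (some v) none).map (fun x => |x|)
  · obtain ⟨e, he, hcond⟩ := hex
    have hne : ess ≠ [] := by rintro rfl; exact (List.not_mem_nil he).elim
    have hany : (ess.any (fun e =>
        match ((PySem.List.enumerate syn).foldl
            (fun d q => d.modify |q.2| [] (fun l => l ++ [q.1])) PySem.Dict.empty).get? e with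
        | none => false
        | some idxs => idxs.all (fun i =>
            decide ((if u < 0 then max 0 ((syn.length : Int) + u) else min (syn.length : Int) u) ≤ i) &&
            decide (i < (if v < 0 then max 0 ((syn.length : Int) + v) else min (syn.length : Int) v))))) = true :=
      List.any_eq_true.mpr ⟨e, he, (pv_cond syn u v e).mpr hcond⟩
    have hT : ((ess.filter (fun esse => decide (esse ∈ syn.map (fun ele => |ele|)))).all
        (fun elem => decide (elem ∈
          (PySem.List.slice syn none (some u) ++ PySem.List.slice syn (some v) none).map (fun ele => |ele|)))) = false :=
      List.all_eq_false.mpr ⟨e, List.mem_filter.mpr ⟨he, by simpa using hcond.1⟩, by simpa using hcond.2⟩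
    rw [hany, hT, if_neg hne]
    simp
  · have hany : (ess.any (fun e =>
        match ((PySem.List.enumerate syn).foldl
            (fun d q => d.modify |q.2| [] (fun l => l ++ [q.1])) PySem.Dict.empty).get? e with
        | none => false
        | some idxs => idxs.all (fun i =>
            decide ((if u < 0 then max 0 ((syn.length : Int) + u) else min (syn.length : Int) u) ≤ i) &&
            decide (i < (if v < 0 then max 0 ((syn.length : Int) + v) else min (syn.length : Int) v))))) = false := by
      refine List.any_eq_false.mpr (fun e he => ?_)
      cases hcb : (match ((PySem.List.enumerate syn).foldl
            (fun d q => d.modify |q.2| [] (fun l => l ++ [q.1])) PySem.Dict.empty).get? e with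
          | none => false
          | some idxs => idxs.all (fun i =>
              decide ((if u < 0 then max 0 ((syn.length : Int) + u) else min (syn.length : Int) u) ≤ i) &&
              decide (i < (if v < 0 then max 0 ((syn.length : Int) + v) else min (syn.length : Int) v)))) with
      | false => simp
      | true => exact absurd ⟨e, he, (pv_cond syn u v e).mp hcb⟩ hex
    have hT : ((ess.filter (fun esse => decide (esse ∈ syn.map (fun ele => |ele|)))).all
        (fun elem => decide (elem ∈
          (PySem.List.slice syn none (some u) ++ PySem.List.slice syn (some v) none).map (fun ele => |ele|)))) = true := by
      refine List.all_eq_true.mpr (fun e hef => ?_)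
      obtain ⟨he, hsyn⟩ := List.mem_filter.mp hef
      rw [decide_eq_true_eq] at hsyn ⊢
      by_contra hnew
      exact hex ⟨e, he, hsyn, hnew⟩
    rw [hany, hT]
    by_cases hne : ess = [] <;> simp [hne]

-- ===== VERDICT (by name: the statement is the Claim_ definition above) =====
theorem deletion_essential_spec : Claim_equal_deletion_essential := by
  intro pos1 pos2 syn ess _
  unfold Spec_deletion_essential
  by_cases h : pos1 > pos2
  · exact pv_main pos2 pos1 syn ess _ _
      (by simp only [deletion_essential, if_pos h])
      (by simp only [deletion_essential_alt, if_pos h])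
  · exact pv_main pos1 pos2 syn ess _ _
      (by simp only [deletion_essential, if_neg h])
      (by simp only [deletion_essential_alt, if_neg h])
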